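-- pv_equiv track=rewrite | github.com/mokcho/spk_id_unlearn_icml2025 | src/data/utils.py | add_pos_symbol
-- ===== SOURCE A (Python) =====
-- def add_pos_symbol(segments):
--     # Add position {S, M, E} to each phonemes
--     _segments = []
--     for i, seg in enumerate(segments):
--         seg = list(seg)
--         # In case of the first segment
--         if (len(_segments) == 0) :
--             if seg[0] == '_': # For the spaces
--                 _segments.append(seg)
--                 continue
--             else:
--                 seg[0] = f'S_{seg[0]}'
--                 _segments.append(seg)
--                 continue
--
--         # In case of the first phoneme of the words
--         if _segments[-1][0] == '_' and seg[0] != '_':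
--             seg[0] = f'S_{seg[0]}'
--             _segments.append(seg)
--             continue
--
--         if seg[0] == '_': # In Case of the space
--             if not _segments[-1][0].startswith('S') : # End of the words
--                 _segments[-1][0] = _segments[-1][0].replace("M", "E")
--             _segments.append(seg)
--         else:
--             # In case of the middle phoneme
--             seg[0] = f'M_{seg[0]}'
--             _segments.append(seg)
--
--     if _segments[-1][0] != '_' and (not _segments[-1][0].startswith('S')):
--         _segments[-1][0] = _segments[-1][0].replace("M", "E")
--
--     return _segments
-- ===== SOURCE B (Python) =====
-- # B: group-then-label — collect maximal runs of non-space phonemes, label each run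
-- # in one place (S_ first, M_ middle, last M->E when the run has >1 phoneme),
-- # emitting space segments between runs; A instead patches the previous entry on the fly.
-- def _label_run(run):
--     labeled = [[('S_' if j == 0 else 'M_') + seg[0]] + seg[1:] for j, seg in enumerate(run)]
--     if len(labeled) > 1:
--         labeled[-1][0] = labeled[-1][0].replace('M', 'E')
--     return labeled
--
-- def add_pos_symbol(segments):
--     out = []
--     run = []
--     for seg in segments:
--         seg = list(seg)
--         if seg[0] == '_':
--             out.extend(_label_run(run))
--             run = []
--             out.append(seg)
--         else:
--             run.append(seg)
--     out.extend(_label_run(run))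
--     return out
-- ===== Notes on version B (the rewrite author's own statement) =====
-- stated objective: alternative
-- what changed: B first collects maximal runs of non-'_' segments and labels each whole run in one helper (S_ first, M_ rest, M->E on the last when the run has >1 phoneme), instead of A's single loop that prefixes each segment and retroactively patches _segments[-1][0] when a space or the end is reached.
import Mathlib
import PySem

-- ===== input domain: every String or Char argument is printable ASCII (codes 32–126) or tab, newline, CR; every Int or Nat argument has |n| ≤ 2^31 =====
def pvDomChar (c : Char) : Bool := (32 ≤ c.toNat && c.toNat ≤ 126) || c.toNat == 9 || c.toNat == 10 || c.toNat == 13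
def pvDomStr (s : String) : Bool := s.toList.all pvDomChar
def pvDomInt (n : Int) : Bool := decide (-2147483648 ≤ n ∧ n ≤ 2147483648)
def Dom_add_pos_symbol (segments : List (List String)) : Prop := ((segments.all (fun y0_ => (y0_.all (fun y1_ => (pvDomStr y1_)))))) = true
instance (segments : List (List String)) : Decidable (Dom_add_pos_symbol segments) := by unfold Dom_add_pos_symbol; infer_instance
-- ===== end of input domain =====

-- B re-decomposes A's patch-the-previous-entry loop as group-then-label (collect each
-- maximal run of non-'_' segments, then label the whole run at once); same cost,
-- different structure ("alternative"); return values only — neither program mutates its input.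

-- ===== PORT A =====
-- A's loop body: acc is Python's _segments kept in REVERSED order (append = cons,
-- _segments[-1] = head); acc is reversed back at the end.
def pvStepA (acc : List (List String)) (seg : List String) : List (List String) :=
  match seg, acc with
  | [], _ => acc  -- seg[0] raises IndexError in Python; such inputs are outside Pre_
  | s0 :: rest, [] =>
      if s0 == "_" then (s0 :: rest) :: []
      else (("S_" ++ s0) :: rest) :: []
  | s0 :: rest, last :: accT =>
      let last0 := last.headD ""  -- _segments[-1][0]; entries are nonempty under Pre_
      if last0 == "_" && s0 != "_" then (("S_" ++ s0) :: rest) :: last :: accT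
      else if s0 == "_" then
        if PySem.Str.startswith last0 "S" then (s0 :: rest) :: last :: accT
        else (s0 :: rest) :: (PySem.Str.replace last0 "M" "E" :: last.tail) :: accT
      else (("M_" ++ s0) :: rest) :: last :: accT

-- A's trailing fixup of _segments[-1][0], then the un-reversal.
def pvFinishA (acc : List (List String)) : List (List String) :=
  match acc with
  | [] => []  -- Python raises IndexError on empty input; outside Pre_
  | last :: accT =>
      let last0 := last.headD ""
      ((if last0 != "_" && !(PySem.Str.startswith last0 "S")
        then PySem.Str.replace last0 "M" "E" :: last.tail else last) :: accT).reverse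

def add_pos_symbol (segments : List (List String)) : List (List String) :=
  pvFinishA (segments.foldl pvStepA [])

-- ===== PORT B =====
-- Source B's _label_run: the enumerate-comprehension, then labeled[-1][0] = ….replace('M','E')
-- when the run has more than one phoneme.
def pvSetLast0 (xs : List (List String)) : List (List String) :=
  match xs with
  | [] => []
  | [l] => [PySem.Str.replace (l.headD "") "M" "E" :: l.tail]
  | x :: rest => x :: pvSetLast0 rest

def pvLabelRun (run : List (List String)) : List (List String) :=
  let labeled := run.zipIdx.map
    (fun p => ((if p.2 == 0 then "S_" else "M_") ++ p.1.headD "") :: p.1.tail)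
  if labeled.length > 1 then pvSetLast0 labeled else labeled

def add_pos_symbol_alt (segments : List (List String)) : List (List String) :=
  let st := segments.foldl
    (fun (st : List (List String) × List (List String)) seg =>
      if seg.headD "" == "_" then (st.1 ++ pvLabelRun st.2 ++ [seg], [])
      else (st.1, st.2 ++ [seg]))
    ([], [])
  st.1 ++ pvLabelRun st.2

-- ===== PRECONDITION & SPEC =====
-- Pre_ excludes exactly the inputs where Python A raises IndexError: the empty list
-- (the final _segments[-1]) and any empty inner segment (seg[0]).
def Pre_add_pos_symbol (segments : List (List String)) : Prop :=
  segments ≠ [] ∧ ∀ s ∈ segments, s ≠ []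
instance (segments : List (List String)) : Decidable (Pre_add_pos_symbol segments) := by
  unfold Pre_add_pos_symbol; infer_instance

def pvWitness_add_pos_symbol : List (List String) := [["a", "x"], ["b"], ["_"], ["c"]]

def Spec_add_pos_symbol (segments : List (List String)) (out : List (List String)) : Prop := out = add_pos_symbol_alt segments
instance (segments : List (List String)) (out : List (List String)) : Decidable (Spec_add_pos_symbol segments out) := by unfold Spec_add_pos_symbol; infer_instance

-- ===== CLAIM (what is proved, stated in full; the proofs are below) =====
def Claim_equal_add_pos_symbol : Prop := ∀ (segments : List (List String)), Dom_add_pos_symbol segments → Pre_add_pos_symbol segments → Spec_add_pos_symbol segments (add_pos_symbol segments)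

-- ===== LEMMAS AND PROOFS =====

-- Labelling vocabulary (proof-side only).
def pvSlab (s : List String) : List String := ("S_" ++ s.headD "") :: s.tail
def pvMlab (s : List String) : List String := ("M_" ++ s.headD "") :: s.tail
def pvFixStr (l : List String) : List String :=
  PySem.Str.replace (l.headD "") "M" "E" :: l.tail

-- provisional labelling of a run, left to right (no end-of-run fixup)
def pvProvL : List (List String) → List (List String)
  | [] => []
  | a :: as => pvSlab a :: as.map pvMlab

-- provisional labelling of the OPEN run, most recent phoneme first
-- (exactly what A's _segments holds above the last flushed position).
def pvProvR : List (List String) → List (List String)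
  | [] => []
  | [x] => [pvSlab x]
  | x :: xs => pvMlab x :: pvProvR xs

-- pvProvR with the head (= the run's last phoneme) fixed up when the run has > 1 phoneme.
def pvFixR : List (List String) → List (List String)
  | [] => []
  | [x] => [x]
  | x :: xs => pvFixStr x :: xs

-- "the last element already appended to out is a space segment '_' :: _"
def pvSpaceLast (out : List (List String)) : Prop :=
  match out.getLast? with
  | none => True
  | some l => l = "_" :: l.tail

-- string facts --------------------------------------------------------------
theorem pv_sw_S (p : String) : PySem.Str.startswith ("S_" ++ p) "S" = true := by
  simp [PySem.Str.startswith, PySem.Chars.startswith]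

theorem pv_sw_M (p : String) : PySem.Str.startswith ("M_" ++ p) "S" = false := by
  simp [PySem.Str.startswith, PySem.Chars.startswith, List.isPrefixOf]

theorem pv_swc_S (cs : List Char) :
    PySem.Chars.startswith ('S' :: '_' :: cs) ['S'] = true := by
  simp [PySem.Chars.startswith, List.isPrefixOf]

theorem pv_swc_M (cs : List Char) :
    PySem.Chars.startswith ('M' :: '_' :: cs) ['S'] = false := by
  simp [PySem.Chars.startswith, List.isPrefixOf]

theorem pv_repl_space : PySem.Str.replace "_" "M" "E" = "_" := by decide

theorem pv_tolist_space : ("_" : String).toList = ['_'] := by decide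

theorem pv_swc_space : PySem.Chars.startswith ['_'] ['S'] = false := by decide

-- pvLabelRun in terms of pvProvL ---------------------------------------------
theorem pv_zipIdx_map (xs : List (List String)) (n : Nat) :
    (xs.zipIdx (n + 1)).map
      (fun p => ((if p.2 == 0 then "S_" else "M_") ++ p.1.headD "") :: p.1.tail)
      = xs.map pvMlab := by
  induction xs generalizing n with
  | nil => rfl
  | cons x xs ih =>
      rw [List.zipIdx_cons, List.map_cons, ih (n + 1)]
      simp [pvMlab]

theorem pv_labelRun_eq (run : List (List String)) :
    pvLabelRun run
      = if run.length > 1 then pvSetLast0 (pvProvL run) else pvProvL run := by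
  cases run with
  | nil => rfl
  | cons a as =>
      unfold pvLabelRun
      rw [List.zipIdx_cons, List.map_cons, pv_zipIdx_map]
      simp [pvProvL, pvSlab]

theorem pv_labelRun_nil : pvLabelRun [] = [] := rfl

theorem pv_setLast0_append (ys : List (List String)) (z : List String) :
    pvSetLast0 (ys ++ [z]) = ys ++ [pvFixStr z] := by
  induction ys with
  | nil => simp [pvSetLast0, pvFixStr]
  | cons y ys ih =>
      cases ys with
      | nil => simp [pvSetLast0, pvFixStr]
      | cons y' ys' => simpa [pvSetLast0] using ih

theorem pv_provL_reverse (rrun : List (List String)) :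
    (pvProvL rrun.reverse).reverse = pvProvR rrun := by
  induction rrun with
  | nil => rfl
  | cons x xs ih =>
      cases xs with
      | nil => rfl
      | cons y ys =>
          obtain ⟨a, as, ha⟩ : ∃ a as, (y :: ys).reverse = a :: as :=
            List.exists_cons_of_ne_nil (by simp)
          have hrev : (x :: y :: ys).reverse = a :: (as ++ [x]) := by
            rw [List.reverse_cons, ha]; rfl
          rw [hrev]
          rw [ha] at ih
          have h2 : pvProvL (a :: (as ++ [x])) = pvProvL (a :: as) ++ [pvMlab x] := by
            simp [pvProvL]
          rw [h2, List.reverse_append]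
          rw [show pvProvR (x :: y :: ys) = pvMlab x :: pvProvR (y :: ys) from rfl, ← ih]
          simp [pvProvL]

theorem pv_provR_nonnil (y : List String) (ys : List (List String)) :
    pvProvR (y :: ys) ≠ [] := by
  cases ys <;> simp [pvProvR]

theorem pv_fixR_cons (x : List String) (y : List String) (ys : List (List String)) :
    pvFixR (pvProvR (x :: y :: ys)) = pvFixStr (pvMlab x) :: pvProvR (y :: ys) := by
  rw [show pvProvR (x :: y :: ys) = pvMlab x :: pvProvR (y :: ys) from rfl]
  cases h : pvProvR (y :: ys) with
  | nil => exact absurd h (pv_provR_nonnil y ys)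
  | cons p ps => simp [pvFixR]

-- the bridge: B's run labelling, reversed, is pvFixR applied to pvProvR
theorem pv_bridge (rrun : List (List String)) :
    (pvLabelRun rrun.reverse).reverse = pvFixR (pvProvR rrun) := by
  cases rrun with
  | nil => rfl
  | cons x xs =>
      cases xs with
      | nil => simp [pv_labelRun_eq, pvProvL, pvProvR, pvFixR]
      | cons y ys =>
          obtain ⟨a, as, ha⟩ : ∃ a as, (y :: ys).reverse = a :: as :=
            List.exists_cons_of_ne_nil (by simp)
          have hrev : (x :: y :: ys).reverse = a :: (as ++ [x]) := by
            rw [List.reverse_cons, ha]; rfl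
          rw [hrev, pv_labelRun_eq]
          have hlen : (a :: (as ++ [x])).length > 1 := by simp
          rw [if_pos hlen]
          have h2 : pvProvL (a :: (as ++ [x])) = pvProvL (a :: as) ++ [pvMlab x] := by
            simp [pvProvL]
          rw [h2, pv_setLast0_append, List.reverse_append]
          have := pv_provL_reverse (y :: ys)
          rw [ha] at this
          rw [this, pv_fixR_cons]
          rfl

theorem pv_provR_single (x : List String) : pvProvR [x] = [pvSlab x] := rfl
theorem pv_provR_cons₂ (x y : List String) (ys : List (List String)) :
    pvProvR (x :: y :: ys) = pvMlab x :: pvProvR (y :: ys) := rfl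

theorem pv_labelRun_single (x : List String) : pvLabelRun [x] = [pvSlab x] := by
  simp [pv_labelRun_eq, pvProvL]

theorem pv_labelRun_rev₂ (x y : List String) (ys : List (List String)) :
    pvLabelRun (x :: y :: ys).reverse
      = (pvFixStr (pvMlab x) :: pvProvR (y :: ys)).reverse := by
  have := pv_bridge (x :: y :: ys)
  rw [pv_fixR_cons] at this
  simpa using congrArg List.reverse this

-- how A's loop body acts in each of its branches ------------------------------
theorem pv_stepA_space_nil (sr : List String) :
    pvStepA [] ("_" :: sr) = [("_" :: sr)] := by
  simp [pvStepA]

theorem pv_stepA_nonspace_nil (s0 : String) (sr : List String) (h0 : ¬ s0 = "_") :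
    pvStepA [] (s0 :: sr) = [pvSlab (s0 :: sr)] := by
  simp [pvStepA, h0, pvSlab]

theorem pv_stepA_space_after_space (l : List String) (accT : List (List String))
    (sr : List String) (hl : l = "_" :: l.tail) :
    pvStepA (l :: accT) ("_" :: sr) = ("_" :: sr) :: l :: accT := by
  have hl0 : l.head?.getD "" = "_" := by rw [hl]; rfl
  simp [pvStepA, hl0, pv_tolist_space, pv_swc_space, pv_repl_space, ← hl]

theorem pv_stepA_space_after_S (x : List String) (accT : List (List String))
    (sr : List String) :
    pvStepA (pvSlab x :: accT) ("_" :: sr) = ("_" :: sr) :: pvSlab x :: accT := by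
  simp [pvStepA, pvSlab, String.ext_iff, pv_sw_S, pv_swc_S]

theorem pv_stepA_space_after_M (x : List String) (accT : List (List String))
    (sr : List String) :
    pvStepA (pvMlab x :: accT) ("_" :: sr)
      = ("_" :: sr) :: pvFixStr (pvMlab x) :: accT := by
  simp [pvStepA, pvMlab, pvFixStr, String.ext_iff, pv_sw_M, pv_swc_M]

theorem pv_stepA_nonspace_after_space (l : List String) (accT : List (List String))
    (s0 : String) (sr : List String) (hl0 : l.head?.getD "" = "_") (h0 : ¬ s0 = "_") :
    pvStepA (l :: accT) (s0 :: sr) = pvSlab (s0 :: sr) :: l :: accT := by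
  simp [pvStepA, hl0, h0, pvSlab]

theorem pv_stepA_nonspace_after_phoneme (t : List String) (accT : List (List String))
    (s0 : String) (sr : List String) (ht : ¬ t.head?.getD "" = "_") (h0 : ¬ s0 = "_") :
    pvStepA (t :: accT) (s0 :: sr) = pvMlab (s0 :: sr) :: t :: accT := by
  simp [pvStepA, ht, h0, pvMlab]

theorem pv_provR_head_ne (x : List String) (xs : List (List String)) :
    ∃ t ts, pvProvR (x :: xs) = t :: ts ∧ ¬ t.head?.getD "" = "_" := by
  cases xs with
  | nil => exact ⟨pvSlab x, [], rfl, by simp [pvSlab, String.ext_iff]⟩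
  | cons y ys =>
      exact ⟨pvMlab x, pvProvR (y :: ys), rfl, by simp [pvMlab, String.ext_iff]⟩

-- how A's trailing fixup acts ------------------------------------------------
theorem pv_finishA_space (l : List String) (accT : List (List String))
    (hl : l = "_" :: l.tail) :
    pvFinishA (l :: accT) = (l :: accT).reverse := by
  have hl0 : l.head?.getD "" = "_" := by rw [hl]; rfl
  simp [pvFinishA, hl0]

theorem pv_finishA_S (x : List String) (accT : List (List String)) :
    pvFinishA (pvSlab x :: accT) = (pvSlab x :: accT).reverse := by
  simp [pvFinishA, pvSlab, String.ext_iff, pv_sw_S, pv_swc_S]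

theorem pv_finishA_M (x : List String) (accT : List (List String)) :
    pvFinishA (pvMlab x :: accT) = (pvFixStr (pvMlab x) :: accT).reverse := by
  simp [pvFinishA, pvMlab, pvFixStr, String.ext_iff, pv_sw_M, pv_swc_M]

-- the loop invariant ---------------------------------------------------------
theorem pv_loop (segs : List (List String)) :
    ∀ (out rrun : List (List String)),
      (∀ s ∈ segs, s ≠ []) →
      (rrun = [] → pvSpaceLast out) →
      pvFinishA (segs.foldl pvStepA (pvProvR rrun ++ out.reverse))
        = (fun st : List (List String) × List (List String) => st.1 ++ pvLabelRun st.2)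
            (segs.foldl
              (fun (st : List (List String) × List (List String)) seg =>
                if seg.headD "" == "_" then (st.1 ++ pvLabelRun st.2 ++ [seg], [])
                else (st.1, st.2 ++ [seg]))
              (out, rrun.reverse)) := by
  induction segs with
  | nil =>
      intro out rrun _ hsp
      simp only [List.foldl_nil]
      cases rrun with
      | nil =>
          cases hout : out.reverse with
          | nil =>
              have houtn : out = [] := List.reverse_eq_nil_iff.mp hout
              subst houtn
              simp [pvFinishA, pvProvR, pv_labelRun_nil]
          | cons l rest =>
              have hlast : out.getLast? = some l := by
                rw [← List.head?_reverse, hout]; rfl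
              have hl : l = "_" :: l.tail := by
                have := hsp rfl; unfold pvSpaceLast at this; rw [hlast] at this; exact this
              simp only [pvProvR, List.nil_append, hout, List.reverse_nil,
                pv_labelRun_nil, List.append_nil]
              rw [pv_finishA_space l rest hl, ← hout, List.reverse_reverse]
      | cons x xs =>
          cases xs with
          | nil =>
              simp only [pv_provR_single, List.singleton_append, List.reverse_cons]
              rw [pv_finishA_S]
              simp [pv_labelRun_single]
          | cons y ys =>
              simp only [pv_provR_cons₂, List.cons_append]
              rw [pv_finishA_M, pv_labelRun_rev₂]
              simp
  | cons seg rest ih =>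
      intro out rrun hne hsp
      obtain ⟨s0, sr, hseg⟩ : ∃ s0 sr, seg = s0 :: sr := by
        cases h : seg with
        | nil => exact absurd h (hne seg (by simp))
        | cons a b => exact ⟨a, b, rfl⟩
      subst hseg
      have hrest : ∀ s ∈ rest, s ≠ [] := fun s hs => hne s (by simp [hs])
      by_cases h0 : s0 = "_"
      · -- flush: A patches acc's head (if needed), B flushes the run
        subst h0
        cases rrun with
        | nil =>
            cases hout : out.reverse with
            | nil =>
                have houtn : out = [] := List.reverse_eq_nil_iff.mp hout
                subst houtn
                simp only [List.foldl_cons, pvProvR, List.nil_append, List.reverse_nil,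
                  pv_stepA_space_nil]
                have hB := ih [("_" :: sr)] [] hrest
                  (by intro _; unfold pvSpaceLast; simp)
                simp only [pvProvR, List.nil_append, List.reverse_nil,
                  List.reverse_cons, pv_labelRun_nil] at hB
                simpa [pv_labelRun_nil] using hB
            | cons l lrest =>
                have hlast : out.getLast? = some l := by
                  rw [← List.head?_reverse, hout]; rfl
                have hl : l = "_" :: l.tail := by
                  have := hsp rfl; unfold pvSpaceLast at this; rw [hlast] at this; exact this
                simp only [List.foldl_cons, pvProvR, List.nil_append, hout,
                  pv_stepA_space_after_space l lrest sr hl]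
                have hB := ih (out ++ [("_" :: sr)]) [] hrest
                  (by intro _; unfold pvSpaceLast; simp)
                simp only [pvProvR, List.nil_append, List.reverse_nil,
                  List.reverse_append, List.reverse_cons, pv_labelRun_nil] at hB
                rw [hout] at hB
                simpa [pv_labelRun_nil] using hB
        | cons x xs =>
            cases xs with
            | nil =>
                simp only [List.foldl_cons, pv_provR_single, List.singleton_append,
                  pv_stepA_space_after_S, List.reverse_cons]
                have hB := ih (out ++ pvLabelRun [x] ++ [("_" :: sr)]) [] hrest
                  (by intro _; unfold pvSpaceLast; simp)
                simp only [pvProvR, List.nil_append, List.reverse_nil,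
                  pv_labelRun_single, List.reverse_append, List.reverse_cons] at hB
                simpa [pv_labelRun_single] using hB
            | cons y ys =>
                simp only [List.foldl_cons, pv_provR_cons₂, List.cons_append,
                  pv_stepA_space_after_M, List.reverse_cons]
                have hB := ih (out ++ pvLabelRun (x :: y :: ys).reverse ++ [("_" :: sr)]) [] hrest
                  (by intro _; unfold pvSpaceLast; simp)
                have hx : pvLabelRun (ys.reverse ++ [y, x])
                    = (pvProvR (y :: ys)).reverse ++ [pvFixStr (pvMlab x)] := by
                  rw [show ys.reverse ++ [y, x] = (x :: y :: ys).reverse by simp,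
                    pv_labelRun_rev₂]
                  simp
                simp only [pvProvR, List.nil_append, List.reverse_nil] at hB
                rw [pv_labelRun_rev₂] at hB
                simp only [List.reverse_append, List.reverse_cons, List.reverse_reverse,
                  List.nil_append, List.append_assoc] at hB ⊢
                simpa [hx] using hB
      · -- extend the run
        have h0' : (s0 == "_") = false := by simp [h0]
        cases rrun with
        | nil =>
            cases hout : out.reverse with
            | nil =>
                have houtn : out = [] := List.reverse_eq_nil_iff.mp hout
                subst houtn
                simp only [List.foldl_cons, pvProvR, List.nil_append, List.reverse_nil,
                  pv_stepA_nonspace_nil s0 sr h0]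
                have hB := ih [] [s0 :: sr] hrest (by intro h; simp at h)
                simp only [pv_provR_single, List.singleton_append, List.reverse_nil,
                  List.append_nil, List.reverse_cons, List.nil_append] at hB
                simpa [h0'] using hB
            | cons l lrest =>
                have hlast : out.getLast? = some l := by
                  rw [← List.head?_reverse, hout]; rfl
                have hl : l = "_" :: l.tail := by
                  have := hsp rfl; unfold pvSpaceLast at this; rw [hlast] at this; exact this
                have hl0 : l.head?.getD "" = "_" := by rw [hl]; rfl
                simp only [List.foldl_cons, pvProvR, List.nil_append, hout,
                  pv_stepA_nonspace_after_space l lrest s0 sr hl0 h0]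
                have hB := ih out [s0 :: sr] hrest (by intro h; simp at h)
                simp only [pv_provR_single, List.singleton_append, hout,
                  List.reverse_cons, List.reverse_nil, List.nil_append] at hB
                simpa [h0'] using hB
        | cons x xs =>
            simp only [List.foldl_cons]
            obtain ⟨t, ts, ht, ht0⟩ := pv_provR_head_ne x xs
            have hA : pvStepA (pvProvR (x :: xs) ++ out.reverse) (s0 :: sr)
                = pvProvR ((s0 :: sr) :: x :: xs) ++ out.reverse := by
              rw [ht, List.cons_append,
                pv_stepA_nonspace_after_phoneme t (ts ++ out.reverse) s0 sr ht0 h0,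
                show pvProvR ((s0 :: sr) :: x :: xs)
                  = pvMlab (s0 :: sr) :: pvProvR (x :: xs) from rfl, ht]
              rfl
            rw [hA]
            have hB := ih out ((s0 :: sr) :: x :: xs) hrest (by intro h; simp at h)
            simp only [List.reverse_cons] at hB ⊢
            simpa [h0'] using hB

-- ===== VERDICT (by name: the statement is the Claim_ definition above) =====
theorem add_pos_symbol_spec : Claim_equal_add_pos_symbol := by
  intro segments _ hpre
  unfold Spec_add_pos_symbol add_pos_symbol add_pos_symbol_alt
  have := pv_loop segments [] [] hpre.2 (by intro _; unfold pvSpaceLast; simp)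
  simpa [pvProvR] using this
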